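-- pv_equiv track=rewrite | github.com/lppavli/YLab | homework_1/task_5.py | count_find_num
-- ===== SOURCE A (Python) =====
-- import itertools, functools
--
-- def multiple(sp):
--     return functools.reduce(lambda result, element: result * element, sp)
--
-- def count_1(pr_i, limit):
--     dl = 1
--     sp = 0
--     while dl < limit:
--         dl *= pr_i
--         sp += 1
--     return sp
--
-- def count_find_num(pr, limit):
--     res = []
--     d = {pr_i: count_1(pr_i, limit) for pr_i in pr}
--     d_iter = []
--     for k, v in d.items():
--         a = list(itertools.product([k], range(1, v + 1)))
--         d_iter.append(a)
--     combinations = itertools.product(*d_iter)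
--     for item in combinations:
--         numb = multiple((n ** degree for n, degree in item))
--         if numb <= limit:
--             res.append(numb)
--     return [len(set(res)), max(res)] if res else []
-- ===== SOURCE B (Python) =====
-- def count_find_num(pr, limit):
--     # Sorted recursive backtracking over the distinct bases, multiplying prime
--     # powers into a running product and pruning a branch as soon as the running
--     # product exceeds the limit and only positive bases remain.
--     bases = sorted(set(pr))
--
--     def powers(k):
--         out = []
--         prev, q = 1, k
--         while prev < limit:
--             out.append(q)
--             prev, q = q, q * k
--         return out
--
--     def dfs(i, prod, found):
--         if i == len(bases):
--             return found | {prod} if prod <= limit else found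
--         if prod > limit and bases[i] > 0:
--             return found
--         for q in powers(bases[i]):
--             found = dfs(i + 1, prod * q, found)
--         return found
--
--     found = dfs(0, 1, set())
--     return [len(found), max(found)] if found else []
-- ===== Notes on version B (the rewrite author's own statement) =====
-- stated objective: alternative
-- what changed: Replaces A's full Cartesian product of per-base exponent ranges (every tuple materialised and multiplied out, deduplicated at the end) with sorted recursive backtracking that carries a running product, generates each base's powers by repeated multiplication, and prunes a branch as soon as the running product exceeds the limit with only positive bases left.
import Mathlib
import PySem

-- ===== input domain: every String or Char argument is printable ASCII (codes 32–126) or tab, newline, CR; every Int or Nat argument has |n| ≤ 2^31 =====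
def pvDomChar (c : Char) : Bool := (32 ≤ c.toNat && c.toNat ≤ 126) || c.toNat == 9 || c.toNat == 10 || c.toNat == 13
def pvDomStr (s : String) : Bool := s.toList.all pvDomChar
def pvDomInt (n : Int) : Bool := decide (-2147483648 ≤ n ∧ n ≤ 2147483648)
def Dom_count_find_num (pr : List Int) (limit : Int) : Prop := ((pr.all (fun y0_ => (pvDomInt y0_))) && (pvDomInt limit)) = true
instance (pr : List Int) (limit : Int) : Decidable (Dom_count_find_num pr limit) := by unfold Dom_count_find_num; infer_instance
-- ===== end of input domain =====

-- B replaces A's full Cartesian product of per-base exponent ranges with sorted recursive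
-- backtracking carrying a running product and pruning once the product exceeds the limit
-- with only positive bases left (alternative algorithm; return values proved equal on Pre_).


-- ===== PORT A =====

-- functools.reduce(lambda r, e: r * e, sp); Python raises TypeError on an empty iterable —
-- that case is excluded by Pre_ (pr ≠ []), the value 0 below is never reached under Pre_.
def pvMultiple : List Int → Int
  | [] => 0
  | x :: xs => xs.foldl (fun result element => result * element) x

-- the while-loop of count_1 (dl *= pr_i; sp += 1 while dl < limit), with fuel: inside
-- Dom ∧ Pre_ the loop exits after at most 32 iterations (|pr_i| ≥ 2, |limit| ≤ 2^31, or
-- limit < 2 and it exits at once), so fuel 64 is never exhausted there; outside Pre_ the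
-- Python loop diverges and nothing is claimed.
def pvCount1Go (k limit : Int) : Nat → Int → Int → Int
  | 0, _, sp => sp
  | fuel + 1, dl, sp => if dl < limit then pvCount1Go k limit fuel (dl * k) (sp + 1) else sp

def pvCount1 (k limit : Int) : Int := pvCount1Go k limit 64 1 0

-- n ** degree for an int degree; exact for degree ≥ 0 (here degree ranges over range(1, v+1))
def pvPow (n e : Int) : Int := n ^ e.toNat

-- itertools.product(*lists): tuples in lexicographic order, first factor varying slowest
def pvCartProd : List (List (Int × Int)) → List (List (Int × Int))
  | [] => [[]]
  | l :: ls => l.flatMap (fun x => (pvCartProd ls).map (fun t => x :: t))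

def count_find_num (pr : List Int) (limit : Int) : List Int :=
  let d : PySem.Dict Int Int := pr.foldl (fun d pr_i => d.insert pr_i (pvCount1 pr_i limit)) PySem.Dict.empty
  let d_iter : List (List (Int × Int)) :=
    d.items.foldl (fun acc kv => acc ++ [(PySem.List.pyRange 1 (kv.2 + 1) 1).map (fun e => (kv.1, e))]) []
  let combinations := pvCartProd d_iter
  let res : List Int := combinations.foldl (fun res item =>
    let numb := pvMultiple (item.map (fun p => pvPow p.1 p.2))
    if numb ≤ limit then res ++ [numb] else res) []
  -- [len(set(res)), max(res)] if res else []  (max on a nonempty list is never none; getD 0 unreached)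
  if res.isEmpty then [] else
    [(((PySem.Set.ofList res).length : Int)), (PySem.List.max? res (fun x => x)).getD 0]

-- ===== PORT B =====

-- Source B's powers(k): prev, q = 1, k; while prev < limit: out.append(q); prev, q = q, q*k —
-- same fuel remark as for pvCount1Go above.
def pvPowersGo (k limit : Int) : Nat → Int → Int → List Int
  | 0, _, _ => []
  | fuel + 1, prev, q => if prev < limit then q :: pvPowersGo k limit fuel q (q * k) else []

def pvPowers (k limit : Int) : List Int := pvPowersGo k limit 64 1 k

-- Source B's dfs(i, prod, found), recursion on the suffix of bases; 'found | {prod}' is Set.add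
def pvDfs (limit : Int) : List Int → Int → PySem.Set Int → PySem.Set Int
  | [], prod, found => if prod ≤ limit then PySem.Set.add found prod else found
  | k :: rest, prod, found =>
    if prod > limit ∧ k > 0 then found
    else (pvPowers k limit).foldl (fun f q => pvDfs limit rest (prod * q) f) found

def count_find_num_alt (pr : List Int) (limit : Int) : List Int :=
  let bases : List Int := PySem.List.sorted (PySem.Set.ofList pr) (fun x => x) false
  let found : PySem.Set Int := pvDfs limit bases 1 PySem.Set.empty
  if found.isEmpty then [] else [((found.length : Int)), (PySem.List.max? found (fun x => x)).getD 0]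

-- ===== PRECONDITION & SPEC =====
-- Pre_ excludes pr = [] (A's reduce raises TypeError on the empty iterable) and, when
-- limit ≥ 2, lists containing -1, 0 or 1 (count_1's while loop never terminates there).
def Pre_count_find_num (pr : List Int) (limit : Int) : Prop :=
  pr ≠ [] ∧ (limit < 2 ∨ ∀ x ∈ pr, x < -1 ∨ 1 < x)
instance (pr : List Int) (limit : Int) : Decidable (Pre_count_find_num pr limit) := by
  unfold Pre_count_find_num; infer_instance

def pvWitness_count_find_num : List Int × Int := ([2, 3], 10)

def Spec_count_find_num (pr : List Int) (limit : Int) (out : List Int) : Prop := out = count_find_num_alt pr limit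
instance (pr : List Int) (limit : Int) (out : List Int) : Decidable (Spec_count_find_num pr limit out) := by unfold Spec_count_find_num; infer_instance

-- ===== CLAIM (what is proved, stated in full; the proofs are below) =====
def Claim_equal_count_find_num : Prop := ∀ (pr : List Int) (limit : Int), Dom_count_find_num pr limit → Pre_count_find_num pr limit → Spec_count_find_num pr limit (count_find_num pr limit)

-- ===== LEMMAS AND PROOFS =====

theorem pvCount1Go_offset (k limit : Int) (fuel : Nat) (dl sp : Int) :
    pvCount1Go k limit fuel dl sp = sp + pvCount1Go k limit fuel dl 0 := by
  induction fuel generalizing dl sp with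
  | zero => simp [pvCount1Go]
  | succ n ih =>
    simp only [pvCount1Go]
    by_cases h : dl < limit
    · rw [if_pos h, if_pos h, ih (dl * k) (sp + 1), ih (dl * k) (0 + 1)]; ring
    · simp [h]

theorem pvCount1Go_nonneg (k limit : Int) (fuel : Nat) (dl : Int) :
    0 ≤ pvCount1Go k limit fuel dl 0 := by
  induction fuel generalizing dl with
  | zero => simp [pvCount1Go]
  | succ n ih =>
    simp only [pvCount1Go]
    by_cases h : dl < limit
    · rw [if_pos h, pvCount1Go_offset]
      have := ih (dl * k); omega
    · simp [h]

-- the two while-loops walk the same power sequence: powers(k) = [k^1, …, k^v]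
theorem pvPowersGo_eq (k limit : Int) (fuel : Nat) : ∀ (n : Nat),
    pvPowersGo k limit fuel (k ^ n) (k ^ (n + 1)) =
      (List.range (pvCount1Go k limit fuel (k ^ n) 0).toNat).map (fun i => k ^ (n + 1 + i)) := by
  induction fuel with
  | zero => intro n; simp [pvPowersGo, pvCount1Go]
  | succ m ih =>
    intro n
    simp only [pvPowersGo, pvCount1Go]
    by_cases h : k ^ n < limit
    · rw [if_pos h, if_pos h]
      have hq : k ^ (n + 1) * k = k ^ (n + 1 + 1) := (pow_succ k (n + 1)).symm
      have hdl : k ^ n * k = k ^ (n + 1) := (pow_succ k n).symm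
      have hnn := pvCount1Go_nonneg k limit m (k ^ (n + 1))
      rw [hq, ih (n + 1), hdl, pvCount1Go_offset k limit m (k ^ (n + 1)) (0 + 1)]
      have htn : ((0 : Int) + 1 + pvCount1Go k limit m (k ^ (n + 1)) 0).toNat
          = (pvCount1Go k limit m (k ^ (n + 1)) 0).toNat + 1 := by omega
      rw [htn, List.range_succ_eq_map, List.map_cons, List.map_map]
      have hhead : k ^ (n + 1) = k ^ (n + 1 + 0) := by norm_num
      have htail : (fun i => k ^ (n + 1 + 1 + i)) = ((fun i => k ^ (n + 1 + i)) ∘ Nat.succ) := by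
        funext i
        simp only [Function.comp_apply]
        congr 1
        omega
      rw [hhead, htail]
    · rw [if_neg h, if_neg h]; simp

theorem pvPowers_eq_range (k limit : Int) :
    pvPowers k limit = (PySem.List.pyRange 1 (pvCount1 k limit + 1) 1).map (fun e => pvPow k e) := by
  have h0 : pvPowers k limit = (List.range (pvCount1 k limit).toNat).map (fun i => k ^ (0 + 1 + i)) := by
    have := pvPowersGo_eq k limit 64 0
    simpa [pvPowers, pvCount1] using this
  rw [h0, PySem.List.pyRange_one]
  have harg : (pvCount1 k limit + 1 - 1).toNat = (pvCount1 k limit).toNat := by omega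
  rw [harg, List.map_map]
  apply List.map_congr_left
  intro i _
  simp only [Function.comp_apply, pvPow]
  congr 1

theorem pvCount1_of_limit_lt_two (k limit : Int) (h : limit < 2) : pvCount1 k limit = 0 := by
  have h1 : ¬ ((1 : Int) < limit) := by omega
  simp [pvCount1, pvCount1Go, h1]

theorem pvGetD_foldl_insert (l : List Int) (f : Int → Int) (d : PySem.Dict Int Int) (k : Int) :
    (l.foldl (fun d x => d.insert x (f x)) d).getD k 0 = if k ∈ l then f k else d.getD k 0 := by
  induction l generalizing d with
  | nil => simp
  | cons x xs ih =>
    rw [List.foldl_cons, ih]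
    by_cases hx : k ∈ xs
    · simp [hx]
    · by_cases hk : x = k
      · subst hk; simp [hx, PySem.Dict.getD_insert_self]
      · have h1 : (d.insert x (f x)).getD k 0 = d.getD k 0 :=
          PySem.Dict.getD_insert_of_ne _ _ _ (Ne.symm hk)
        have h2 : k ∉ x :: xs := by
          simp only [List.mem_cons, not_or]
          exact ⟨fun h => hk h.symm, hx⟩
        rw [if_neg hx, h1, if_neg h2]

theorem pvFoldl_append_singleton {α β : Type} (l : List α) (g : α → β) (acc : List β) :
    l.foldl (fun acc x => acc ++ [g x]) acc = acc ++ l.map g := by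
  induction l generalizing acc with
  | nil => simp
  | cons x xs ih => simp [ih]

theorem pvFoldl_filter {α : Type} (l : List α) (f : α → Int) (limit : Int) (acc : List Int) :
    l.foldl (fun r t => if f t ≤ limit then r ++ [f t] else r) acc =
      acc ++ (l.map f).filter (fun n => n ≤ limit) := by
  induction l generalizing acc with
  | nil => simp
  | cons x xs ih => by_cases h : f x ≤ limit <;> simp [h, ih]

theorem pvFoldl_mul (l : List Int) (a : Int) :
    l.foldl (fun r e => r * e) a = a * l.prod := by
  induction l generalizing a with
  | nil => simp
  | cons x xs ih => simp [ih, mul_assoc]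

def pvCanMake (v : Int → Int) : List Int → Int → Prop
  | [], x => x = 1
  | k :: ks, x => ∃ e : Int, (1 ≤ e ∧ e < v k + 1) ∧ ∃ y, pvCanMake v ks y ∧ x = pvPow k e * y

theorem pvMem_A (v : Int → Int) (ks : List Int) (x : Int) :
    x ∈ (pvCartProd (ks.map (fun k => (PySem.List.pyRange 1 (v k + 1) 1).map (fun e => (k, e))))).map
        (fun t => (t.map (fun p => pvPow p.1 p.2)).prod) ↔ pvCanMake v ks x := by
  induction ks generalizing x with
  | nil => simp [pvCartProd, pvCanMake]
  | cons k ks ih =>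
    simp only [List.map_cons, pvCartProd, pvCanMake]
    constructor
    · intro hx
      obtain ⟨t, ht, rfl⟩ := List.mem_map.1 hx
      obtain ⟨p, hp, ht2⟩ := List.mem_flatMap.1 ht
      obtain ⟨t', ht', rfl⟩ := List.mem_map.1 ht2
      obtain ⟨e, he, rfl⟩ := List.mem_map.1 hp
      refine ⟨e, PySem.List.mem_pyRange_one.1 he, (t'.map (fun p => pvPow p.1 p.2)).prod,
        (ih _).1 (List.mem_map.2 ⟨t', ht', rfl⟩), ?_⟩
      simp
    · rintro ⟨e, he, y, hy, rfl⟩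
      obtain ⟨t', ht', rfl⟩ := List.mem_map.1 ((ih y).2 hy)
      refine List.mem_map.2 ⟨(k, e) :: t', List.mem_flatMap.2
        ⟨(k, e), List.mem_map.2 ⟨e, PySem.List.mem_pyRange_one.2 he, rfl⟩,
          List.mem_map.2 ⟨t', ht', rfl⟩⟩, by simp⟩

-- pvCanMake is invariant under permuting the base list (the product commutes)
theorem pvCanMake_perm (v : Int → Int) {l1 l2 : List Int} (h : l1.Perm l2) :
    ∀ x, pvCanMake v l1 x ↔ pvCanMake v l2 x := by
  induction h with
  | nil => intro x; exact Iff.rfl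
  | cons a _ ih =>
    intro x
    simp only [pvCanMake]
    constructor
    · rintro ⟨e, he, y, hy, rfl⟩; exact ⟨e, he, y, (ih y).1 hy, rfl⟩
    · rintro ⟨e, he, y, hy, rfl⟩; exact ⟨e, he, y, (ih y).2 hy, rfl⟩
  | swap a b l =>
    intro x
    simp only [pvCanMake]
    constructor
    · rintro ⟨e1, he1, y1, ⟨e2, he2, y2, hy2, rfl⟩, rfl⟩
      exact ⟨e2, he2, pvPow b e1 * y2, ⟨e1, he1, y2, hy2, rfl⟩, by ring⟩
    · rintro ⟨e1, he1, y1, ⟨e2, he2, y2, hy2, rfl⟩, rfl⟩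
      exact ⟨e2, he2, pvPow a e1 * y2, ⟨e1, he1, y2, hy2, rfl⟩, by ring⟩
  | trans _ _ ih1 ih2 => intro x; exact (ih1 x).trans (ih2 x)

-- under Pre_, every product of ≥2 bases is ≥ 1 (used to justify the prune)
theorem pvCanMake_one_le (v : Int → Int) :
    ∀ (ks : List Int) (y : Int), (∀ b ∈ ks, 2 ≤ b) → pvCanMake v ks y → 1 ≤ y := by
  intro ks
  induction ks with
  | nil => intro y _ hy; simp [pvCanMake] at hy; omega
  | cons k rest ih =>
    rintro y hall ⟨e, _, y', hy', rfl⟩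
    have hk : (2 : Int) ≤ k := hall k (List.mem_cons_self)
    have h1 : (1 : Int) ≤ pvPow k e := one_le_pow₀ (by omega)
    have h2 : (1 : Int) ≤ y' := ih y' (fun b hb => hall b (List.mem_cons_of_mem _ hb)) hy'
    nlinarith

-- membership in the backtracking set: found plus all completed products ≤ limit
theorem pvDfs_mem (limit : Int) :
    ∀ (bases : List Int) (prod : Int) (found : PySem.Set Int) (x : Int),
      (limit < 2 ∨ ∀ b ∈ bases, b < -1 ∨ 1 < b) → bases.Pairwise (· ≤ ·) →
      (x ∈ pvDfs limit bases prod found ↔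
        x ∈ found ∨ ∃ y, pvCanMake (fun k => pvCount1 k limit) bases y ∧ x = prod * y ∧ prod * y ≤ limit) := by
  intro bases
  induction bases with
  | nil =>
    intro prod found x _ _
    simp only [pvDfs, pvCanMake]
    by_cases h : prod ≤ limit
    · rw [if_pos h, PySem.Set.mem_add]
      constructor
      · rintro (hf | rfl)
        · exact Or.inl hf
        · exact Or.inr ⟨1, rfl, by simpa using h⟩
      · rintro (hf | ⟨y, rfl, rfl, _⟩)
        · exact Or.inl hf
        · right; ring
    · rw [if_neg h]
      constructor
      · exact Or.inl
      · rintro (hf | ⟨y, rfl, rfl, hle⟩)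
        · exact hf
        · rw [mul_one] at hle; exact absurd hle h
  | cons k rest ih =>
    intro prod found x hgood hsorted
    have hgoodr : limit < 2 ∨ ∀ b ∈ rest, b < -1 ∨ 1 < b := by
      rcases hgood with h | h
      · exact Or.inl h
      · exact Or.inr (fun b hb => h b (List.mem_cons_of_mem _ hb))
    have hsortedr : rest.Pairwise (· ≤ ·) := hsorted.of_cons
    simp only [pvDfs]
    by_cases hp : prod > limit ∧ k > 0
    · rw [if_pos hp]
      constructor
      · exact Or.inl
      · rintro (hf | ⟨y, ⟨e, he, y', hy', rfl⟩, rfl, hle⟩)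
        · exact hf
        · exfalso
          have he' : 1 ≤ e ∧ e < pvCount1 k limit + 1 := he
          rcases hgood with hl2 | hall
          · -- limit < 2 ⇒ v k = 0 ⇒ no admissible exponent
            rw [pvCount1_of_limit_lt_two k limit hl2] at he'; omega
          · have hk2 : (2 : Int) ≤ k := by
              rcases hall k List.mem_cons_self with h | h
              · omega
              · omega
            have hrest2 : ∀ b ∈ rest, (2 : Int) ≤ b := by
              intro b hb
              have hkb : k ≤ b := (List.pairwise_cons.1 hsorted).1 b hb
              omega
            have h1 : (1 : Int) ≤ pvPow k e := one_le_pow₀ (by omega)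
            have h2 : (1 : Int) ≤ y' :=
              pvCanMake_one_le (fun k => pvCount1 k limit) rest y' hrest2 hy'
            have hlim2 : ¬ (limit < 2) := by
              intro h
              rw [pvCount1_of_limit_lt_two k limit h] at he'; omega
            have hprodpos : 0 < prod := by omega
            have hPy : 1 ≤ pvPow k e * y' := by nlinarith
            have hmono : prod ≤ prod * (pvPow k e * y') :=
              le_mul_of_one_le_right (le_of_lt hprodpos) hPy
            linarith [hp.1]
    · rw [if_neg hp, pvPowers_eq_range]
      -- fold over the powers list: membership splits over the chosen exponent
      have hfold : ∀ (qs : List Int) (found : PySem.Set Int),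
          x ∈ qs.foldl (fun f q => pvDfs limit rest (prod * q) f) found ↔
            x ∈ found ∨ ∃ q ∈ qs, ∃ y', pvCanMake (fun k => pvCount1 k limit) rest y' ∧
              x = prod * q * y' ∧ prod * q * y' ≤ limit := by
        intro qs
        induction qs with
        | nil => intro found; simp
        | cons q qs ihq =>
          intro found
          rw [List.foldl_cons, ihq, ih (prod * q) found x hgoodr hsortedr]
          constructor
          · rintro ((hf | ⟨y', hy', rfl, hle⟩) | ⟨q', hq', y', hy', rfl, hle⟩)
            · exact Or.inl hf
            · exact Or.inr ⟨q, List.mem_cons_self, y', hy', rfl, hle⟩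
            · exact Or.inr ⟨q', List.mem_cons_of_mem _ hq', y', hy', rfl, hle⟩
          · rintro (hf | ⟨q', hq', y', hy', rfl, hle⟩)
            · exact Or.inl (Or.inl hf)
            · rcases List.mem_cons.1 hq' with rfl | hq'
              · exact Or.inl (Or.inr ⟨y', hy', rfl, hle⟩)
              · exact Or.inr ⟨q', hq', y', hy', rfl, hle⟩
      rw [hfold]
      simp only [pvCanMake]
      constructor
      · rintro (hf | ⟨q, hq, y', hy', rfl, hle⟩)
        · exact Or.inl hf
        · obtain ⟨e, he, rfl⟩ := List.mem_map.1 hq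
          exact Or.inr ⟨pvPow k e * y', ⟨e, PySem.List.mem_pyRange_one.1 he, y', hy', rfl⟩,
            by ring, by rw [show prod * (pvPow k e * y') = prod * pvPow k e * y' by ring]; exact hle⟩
      · rintro (hf | ⟨y, ⟨e, he, y', hy', rfl⟩, rfl, hle⟩)
        · exact Or.inl hf
        · refine Or.inr ⟨pvPow k e, List.mem_map.2 ⟨e, PySem.List.mem_pyRange_one.2 he, rfl⟩,
            y', hy', by ring, ?_⟩
          rw [show prod * pvPow k e * y' = prod * (pvPow k e * y') by ring]; exact hle

theorem pvDfs_nodup (limit : Int) :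
    ∀ (bases : List Int) (prod : Int) (found : PySem.Set Int),
      found.Nodup → (pvDfs limit bases prod found).Nodup := by
  intro bases
  induction bases with
  | nil =>
    intro prod found hf
    simp only [pvDfs]
    split_ifs
    · exact PySem.Set.nodup_add _ _ hf
    · exact hf
  | cons k rest ih =>
    intro prod found hf
    simp only [pvDfs]
    split_ifs
    · exact hf
    · have : ∀ (qs : List Int) (found : PySem.Set Int), found.Nodup →
          (qs.foldl (fun f q => pvDfs limit rest (prod * q) f) found).Nodup := by
        intro qs
        induction qs with
        | nil => intro found hf; exact hf
        | cons q qs ihq => intro found hf; exact ihq _ (ih _ _ hf)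
      exact this _ _ hf

theorem pvMax_congr (l1 l2 : List Int) (h : ∀ x, x ∈ l1 ↔ x ∈ l2) (hne : l1 ≠ []) :
    (PySem.List.max? l1 (fun x => x)).getD 0 = (PySem.List.max? l2 (fun x => x)).getD 0 := by
  have hne2 : l2 ≠ [] := by
    cases l1 with
    | nil => exact absurd rfl hne
    | cons a t => exact List.ne_nil_of_mem ((h a).1 List.mem_cons_self)
  obtain ⟨m1, hm1⟩ : ∃ m, PySem.List.max? l1 (fun x => x) = some m := by
    cases hq : PySem.List.max? l1 (fun x => x) with
    | none => exact absurd ((PySem.List.max?_eq_none_iff _ _).1 hq) hne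
    | some m => exact ⟨m, rfl⟩
  obtain ⟨m2, hm2⟩ : ∃ m, PySem.List.max? l2 (fun x => x) = some m := by
    cases hq : PySem.List.max? l2 (fun x => x) with
    | none => exact absurd ((PySem.List.max?_eq_none_iff _ _).1 hq) hne2
    | some m => exact ⟨m, rfl⟩
  rw [hm1, hm2]
  have h12 : m1 ≤ m2 := PySem.List.max?_isMax hm2 m1 ((h m1).1 (PySem.List.max?_mem hm1))
  have h21 : m2 ≤ m1 := PySem.List.max?_isMax hm1 m2 ((h m2).2 (PySem.List.max?_mem hm2))
  simp [le_antisymm h12 h21]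

theorem pvMultiple_cons (a : Int) (l : List Int) : pvMultiple (a :: l) = (a :: l).prod := by
  simp [pvMultiple, pvFoldl_mul]

theorem pvFinal (resA resB : List Int) (hmem : ∀ x, x ∈ resA ↔ x ∈ resB) (hB : resB.Nodup) :
    (if resA.isEmpty then ([] : List Int) else
      [(((PySem.Set.ofList resA).length : Int)), (PySem.List.max? resA (fun x => x)).getD 0]) =
    (if resB.isEmpty then ([] : List Int) else
      [((resB.length : Int)), (PySem.List.max? resB (fun x => x)).getD 0]) := by
  by_cases hA : resA = []
  · have hBnil : resB = [] := List.eq_nil_iff_forall_not_mem.2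
      (fun x hx => List.eq_nil_iff_forall_not_mem.1 hA x ((hmem x).2 hx))
    simp [hA, hBnil]
  · have hBne : resB ≠ [] := by
      obtain ⟨a, t, rfl⟩ := List.exists_cons_of_ne_nil hA
      exact List.ne_nil_of_mem ((hmem a).1 List.mem_cons_self)
    have hsetmem : ∀ x, x ∈ PySem.Set.ofList resA ↔ x ∈ resB := by
      intro x; rw [PySem.Set.mem_ofList]; exact hmem x
    have hperm : (PySem.Set.ofList resA).Perm resB :=
      (List.perm_ext_iff_of_nodup (PySem.Set.nodup_ofList _) hB).2 hsetmem
    have hlen : (PySem.Set.ofList resA).length = resB.length := hperm.length_eq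
    have hmax := pvMax_congr resA resB hmem hA
    simp [List.isEmpty_iff, hA, hBne, hlen, hmax]

-- ===== VERDICT (by name: the statement is the Claim_ definition above) =====
theorem count_find_num_spec : Claim_equal_count_find_num := by
  intro pr limit _ hpre
  obtain ⟨hne, hgoodpr⟩ := hpre
  unfold Spec_count_find_num count_find_num count_find_num_alt
  have hitems : (pr.foldl (fun d pr_i => d.insert pr_i (pvCount1 pr_i limit)) PySem.Dict.empty).items
      = (PySem.Set.ofList pr).map (fun k => (k, pvCount1 k limit)) := by
    have hkeys : (pr.foldl (fun d pr_i => d.insert pr_i (pvCount1 pr_i limit)) PySem.Dict.empty).keys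
        = PySem.Set.ofList pr := by
      rw [PySem.Dict.keys_foldl_insert]
      rfl
    have hnd : (pr.foldl (fun d pr_i => d.insert pr_i (pvCount1 pr_i limit)) PySem.Dict.empty).keys.Nodup := by
      rw [hkeys]; exact PySem.Set.nodup_ofList _
    rw [PySem.Dict.items_eq_map_keys _ hnd 0, hkeys]
    apply List.map_congr_left
    intro k hk
    rw [PySem.Set.mem_ofList] at hk
    rw [pvGetD_foldl_insert pr (fun x => pvCount1 x limit), if_pos hk]
  simp only [hitems, pvFoldl_append_singleton, List.nil_append, List.map_map, Function.comp_def,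
    pvFoldl_filter]
  -- B side: sorted distinct bases, good and sorted
  have hperm : (PySem.List.sorted (PySem.Set.ofList pr) (fun x => x) false).Perm (PySem.Set.ofList pr) :=
    PySem.List.sorted_perm _ _ _
  have hgoodb : limit < 2 ∨ ∀ b ∈ PySem.List.sorted (PySem.Set.ofList pr) (fun x => x) false,
      b < -1 ∨ 1 < b := by
    rcases hgoodpr with h | h
    · exact Or.inl h
    · exact Or.inr (fun b hb => h b ((PySem.Set.mem_ofList _ _).1 (hperm.mem_iff.1 hb)))
  have hsortedb : (PySem.List.sorted (PySem.Set.ofList pr) (fun x => x) false).Pairwise (· ≤ ·) :=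
    PySem.List.sorted_pairwise _ _
  -- A side membership: res needs pvMultiple = prod (lists in cartProd are nonempty since pr ≠ [])
  have hkscons : ∃ k0 ks', PySem.Set.ofList pr = k0 :: ks' := by
    obtain ⟨p0, t, rfl⟩ := List.exists_cons_of_ne_nil hne
    exact List.exists_cons_of_ne_nil (List.ne_nil_of_mem ((PySem.Set.mem_ofList _ _).2 List.mem_cons_self))
  have hmapeq : ((pvCartProd ((PySem.Set.ofList pr).map
        (fun k => (PySem.List.pyRange 1 (pvCount1 k limit + 1) 1).map (fun e => (k, e))))).map
        (fun t => pvMultiple (t.map (fun p => pvPow p.1 p.2))))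
      = (pvCartProd ((PySem.Set.ofList pr).map
        (fun k => (PySem.List.pyRange 1 (pvCount1 k limit + 1) 1).map (fun e => (k, e))))).map
        (fun t => (t.map (fun p => pvPow p.1 p.2)).prod) := by
    apply List.map_congr_left
    intro t ht
    obtain ⟨k0, ks', hks⟩ := hkscons
    rw [hks, List.map_cons] at ht
    simp only [pvCartProd] at ht
    obtain ⟨p, -, ht2⟩ := List.mem_flatMap.1 ht
    obtain ⟨t', -, rfl⟩ := List.mem_map.1 ht2
    rw [List.map_cons, pvMultiple_cons]
  rw [hmapeq]
  apply pvFinal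
  · intro x
    rw [List.mem_filter,
        pvDfs_mem limit _ 1 PySem.Set.empty x hgoodb hsortedb]
    constructor
    · rintro ⟨hx, hle⟩
      refine Or.inr ⟨x, ?_, (one_mul x).symm, by simp only [one_mul]; exact of_decide_eq_true hle⟩
      exact (pvCanMake_perm _ hperm.symm x).1 ((pvMem_A (fun k => pvCount1 k limit) _ x).1 hx)
    · rintro (hf | ⟨y, hy, rfl, hle⟩)
      · simp [PySem.Set.empty] at hf
      · rw [one_mul] at hle ⊢
        refine ⟨?_, by simpa using hle⟩
        exact (pvMem_A (fun k => pvCount1 k limit) _ y).2 ((pvCanMake_perm _ hperm.symm y).2 hy)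
  · exact pvDfs_nodup limit _ 1 PySem.Set.empty List.nodup_nil
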